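-- pv_equiv track=rewrite | github.com/Alex-2kZharkov/Python-chatbot-test | results.py | reformat_grades
-- ===== SOURCE A (Python) =====
-- def reformat_grades(grades): #сделать строки с оценками типо 0-15, 15-30 и тд
--
--     result_array = []
--     str = None
--     for i in range(len(grades)):
--         if i == 0:
--             str = f"0 - {grades[i]}"
--         else:
--             str = f"{grades[i - 1]} - {grades[i]}"
--         result_array.append(str)
--
--     return result_array
-- ===== SOURCE B (Python) =====
-- def reformat_grades(grades):
--     # Consume the boundary list as a stack from the end, emitting the range
--     # strings back-to-front; the implicit 0 lower bound is handled when the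
--     # stack is down to its first element. Reverse once at the end.
--     rest = list(grades)
--     out = []
--     while len(rest) > 1:
--         g = rest.pop()
--         out.append(f"{rest[-1]} - {g}")
--     if rest:
--         out.append(f"0 - {rest.pop()}")
--     out.reverse()
--     return out
-- ===== Notes on version B (the rewrite author's own statement) =====
-- stated objective: alternative
-- what changed: Replaces A's forward index loop with its i==0 branch by consuming the boundary list as a stack from the end, emitting the strings back-to-front and reversing once; the implicit 0 start is the stack-exhaustion case, not a branch inside the loop.
import Mathlib
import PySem

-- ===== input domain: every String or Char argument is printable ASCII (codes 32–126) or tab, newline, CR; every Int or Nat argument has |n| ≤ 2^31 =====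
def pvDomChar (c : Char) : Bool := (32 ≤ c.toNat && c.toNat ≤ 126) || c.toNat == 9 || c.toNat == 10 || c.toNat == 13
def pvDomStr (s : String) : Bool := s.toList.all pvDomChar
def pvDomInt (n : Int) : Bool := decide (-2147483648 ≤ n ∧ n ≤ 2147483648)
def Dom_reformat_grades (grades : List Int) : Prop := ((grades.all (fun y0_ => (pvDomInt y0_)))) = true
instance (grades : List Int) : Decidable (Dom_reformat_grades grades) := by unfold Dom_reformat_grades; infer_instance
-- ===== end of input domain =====

-- B replaces A's forward index loop with its i==0 branch by consuming the list as a stack from the end, building the output back-to-front and reversing once (alternative; same cost).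

-- ===== PORT A =====
-- index loop: for i in range(len(grades)): branch on i == 0, append the formatted string
def reformat_grades (grades : List Int) : List String :=
  (PySem.List.pyRange 0 grades.length 1).foldl
    (fun acc i =>
      let s : String :=
        if i == 0 then "0 - " ++ PySem.Int.toStr (PySem.List.pyGetD grades i 0)
        else PySem.Int.toStr (PySem.List.pyGetD grades (i - 1) 0) ++ " - " ++
             PySem.Int.toStr (PySem.List.pyGetD grades i 0)
      acc ++ [s]) []

-- ===== PORT B =====
-- while len(rest) > 1: g = rest.pop(); out.append(f"{rest[-1]} - {g}")
def rgLoop (rest : List Int) (out : List String) : List String × List Int :=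
  if 1 < rest.length then
    let g := rest.getLast!
    let rest' := rest.dropLast
    rgLoop rest' (out ++ [PySem.Int.toStr rest'.getLast! ++ " - " ++ PySem.Int.toStr g])
  else (out, rest)
termination_by rest.length
decreasing_by simp [List.length_dropLast]; omega

-- if rest: out.append(f"0 - {rest.pop()}"); out.reverse()
def reformat_grades_alt (grades : List Int) : List String :=
  let p := rgLoop grades []
  let out := if p.2 ≠ [] then p.1 ++ ["0 - " ++ PySem.Int.toStr p.2.getLast!] else p.1
  out.reverse

-- ===== PRECONDITION & SPEC =====
def Spec_reformat_grades (grades : List Int) (out : List String) : Prop := out = reformat_grades_alt grades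
instance (grades : List Int) (out : List String) : Decidable (Spec_reformat_grades grades out) := by unfold Spec_reformat_grades; infer_instance

-- ===== CLAIM (what is proved, stated in full; the proofs are below) =====
def Claim_equal_reformat_grades : Prop := ∀ (grades : List Int), Dom_reformat_grades grades → Spec_reformat_grades grades (reformat_grades grades)

-- ===== LEMMAS AND PROOFS =====

def pvFmt (p : Int × Int) : String := PySem.Int.toStr p.1 ++ " - " ++ PySem.Int.toStr p.2

def pvZipmap (p : Int) (l : List Int) : List String := (List.zip (p :: l) l).map pvFmt

lemma pv_toStr_zero : ("0 - " : String) = PySem.Int.toStr 0 ++ " - " := by decide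

-- A's foldl as a map over consecutive pairs
lemma reformat_A_eq_zip (grades : List Int) :
    reformat_grades grades = pvZipmap 0 grades := by
  unfold reformat_grades pvZipmap
  rw [PySem.List.foldl_append_singleton_eq_map]
  apply List.ext_getElem
  · simp [PySem.List.length_pyRange_one]
  · intro k hk1 hk2
    have hk : k < grades.length := by
      simpa [PySem.List.length_pyRange_one] using hk1
    simp only [List.nil_append]
    rw [List.getElem_map, PySem.List.getElem_pyRange_one, List.getElem_map, List.getElem_zip]
    rcases Nat.eq_zero_or_pos k with h0 | hpos
    · subst h0
      cases grades with
      | nil => simp at hk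
      | cons g gs =>
        simp [PySem.List.pyGetD_zero_cons, pvFmt, pv_toStr_zero]
    · have hne : ((0 : Int) + (k : Int)) ≠ 0 := by
        have : (0:Int) < (k:Int) := by exact_mod_cast hpos
        omega
      rw [if_neg (by simpa using hne)]
      have h1 : PySem.List.pyGetD grades ((0 : Int) + (k : Int)) 0 = grades[k] := by
        rw [PySem.List.pyGetD_eq_getElem] <;> simp <;> omega
      have h2 : PySem.List.pyGetD grades ((0 : Int) + (k : Int) - 1) 0 = grades[k - 1] := by
        have : (0 : Int) + (k : Int) - 1 = ((k - 1 : Nat) : Int) := by omega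
        rw [this, PySem.List.pyGetD_eq_getElem] <;> simp <;> omega
      rw [h1, h2]
      have h3 : ((0 : Int) :: grades)[k]'(by simpa using Nat.lt_succ_of_lt hk) = grades[k - 1] := by
        cases grades with
        | nil => simp at hk
        | cons g gs =>
          rcases k with _ | k'
          · omega
          · simp
      simp [h3, pvFmt]

lemma pv_glD_cons (x p : Int) (xs : List Int) :
    (x :: xs).getLast?.getD p = xs.getLast?.getD x := by
  induction xs generalizing x p with
  | nil => simp
  | cons a as ih =>
    rw [List.getLast?_cons_cons, ih a p, ih a x]

lemma pvZipmap_append (p : Int) (l : List Int) (b : Int) :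
    pvZipmap p (l ++ [b]) = pvZipmap p l ++ [pvFmt (l.getLast?.getD p, b)] := by
  induction l generalizing p with
  | nil => simp [pvZipmap]
  | cons x xs ih =>
    simp only [pvZipmap, List.cons_append, List.zip_cons_cons, List.map_cons] at *
    rw [ih x, pv_glD_cons]

-- the interior pairs: pvZipmap without the leading 0-pair
def pvZtail : List Int → List String
  | [] => []
  | p :: l => pvZipmap p l

lemma pvZtail_append (l : List Int) (b : Int) (h : l ≠ []) :
    pvZtail (l ++ [b]) = pvZtail l ++ [pvFmt (l.getLast?.getD 0, b)] := by
  cases l with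
  | nil => simp at h
  | cons p xs =>
    simp only [pvZtail, List.cons_append]
    rw [pvZipmap_append, pv_glD_cons]

lemma pv_dropLast_append (l : List Int) (h : l ≠ []) :
    l.dropLast ++ [l.getLast?.getD 0] = l := by
  induction l with
  | nil => simp at h
  | cons x xs ih =>
    cases xs with
    | nil => simp
    | cons a as =>
      have h2 := ih (by simp)
      rw [List.dropLast_cons₂, List.getLast?_cons_cons]
      simpa using congrArg (x :: ·) h2

lemma rgLoop_eq (rest : List Int) (out : List String) :
    rgLoop rest out = (out ++ (pvZtail rest).reverse, rest.take 1) := by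
  induction hn : rest.length using Nat.strong_induction_on generalizing rest out with
  | _ n ih =>
    by_cases h : 1 < rest.length
    · have hne : rest ≠ [] := by intro he; simp [he] at h
      have hdne : rest.dropLast ≠ [] := by
        intro he
        have := congrArg List.length he
        simp [List.length_dropLast] at this
        omega
      rw [rgLoop, if_pos h,
          ih rest.dropLast.length (by simp [List.length_dropLast]; omega) _ _ rfl]
      have hsplit : rest.dropLast ++ [rest.getLast?.getD 0] = rest :=
        pv_dropLast_append rest hne
      refine Prod.ext ?_ ?_
      · show out ++ [_] ++ (pvZtail rest.dropLast).reverse = out ++ (pvZtail rest).reverse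
        conv_rhs => rw [show pvZtail rest = pvZtail (rest.dropLast ++ [rest.getLast?.getD 0]) by rw [hsplit]]
        rw [pvZtail_append _ _ hdne]
        simp [pvFmt]
      · show rest.dropLast.take 1 = rest.take 1
        conv_rhs => rw [← hsplit]
        have hle : 1 ≤ rest.dropLast.length := List.length_pos_of_ne_nil hdne
        rw [List.take_append_of_le_length hle]
    · rw [rgLoop, if_neg h]
      cases rest with
      | nil => simp [pvZtail]
      | cons a as =>
        cases as with
        | nil => simp [pvZtail, pvZipmap]
        | cons b bs => simp [List.length_cons] at h

lemma pv_alt_eq_zip (grades : List Int) :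
    reformat_grades_alt grades = pvZipmap 0 grades := by
  unfold reformat_grades_alt
  rw [rgLoop_eq]
  cases grades with
  | nil => simp [pvZtail, pvZipmap]
  | cons g gs =>
    simp only [ne_eq, pvZtail]
    have hz : pvZipmap 0 (g :: gs) = pvFmt (0, g) :: pvZipmap g gs := by
      simp [pvZipmap, List.zip_cons_cons]
    rw [hz]
    simp [pvFmt, pv_toStr_zero]

-- ===== VERDICT (by name: the statement is the Claim_ definition above) =====
theorem reformat_grades_spec : Claim_equal_reformat_grades := by
  intro grades _
  unfold Spec_reformat_grades
  rw [reformat_A_eq_zip, pv_alt_eq_zip]
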